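-- pv_equiv track=rewrite | github.com/EthanPJames/HW2 | homework2.py | combine_birthday_data
-- ===== SOURCE A (Python) =====
-- def combine_birthday_data(person_to_day, person_to_month, person_to_year):
--     #person_to_day, person_to_month, person_to_year are dictionaries
--
--     # Write your code here
--
--
--     month_to_person_data = {}         #Empty dicitonary created
--     for name in person_to_month:        #For loop creating the dictionary
--         month = person_to_month[name]   #Month calcuation
--         day = person_to_day[name]       #day calculation
--         year = person_to_year[name]     #year calcuation
--
--         age = 2022 - year            #age calculation
--
--         if month in month_to_person_data.keys(): #Check the keys
--             if age > month_to_person_data[month][1][2]: #Access the tuples involving age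
--                 month_to_person_data[month] = ((name, (day, year, age)))  #replace old person with new person based on who is older
--         else:
--            month_to_person_data[month] = ((name, (day, year, age)))  #Keep original person or the one compared with who was already older
--
--     return month_to_person_data
-- ===== SOURCE B (Python) =====
-- def combine_birthday_data(person_to_day, person_to_month, person_to_year):
--     # Pass 1: flatten to (month, name) pairs and group names by month, in order.
--     pairs = [(person_to_month[name], name) for name in person_to_month]
--     month_to_names = {}
--     for month, name in pairs:
--         month_to_names.setdefault(month, []).append(name)
--     # Pass 2: per month pick the oldest person (first-max wins, like A's strict '>').
--     result = {}
--     for month, names in month_to_names.items():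
--         oldest = max(names, key=lambda n: 2022 - person_to_year[n])
--         year = person_to_year[oldest]
--         result[month] = (oldest, (person_to_day[oldest], year, 2022 - year))
--     return result
-- ===== Notes on version B (the rewrite author's own statement) =====
-- stated objective: alternative
-- what changed: A fuses grouping and best-so-far selection into one dict-updating loop with a strict '>' replacement test; B decomposes it into a grouping pass (month -> list of names) followed by a per-month first-max selection via max(key=age), building the result dict afterwards.
import Mathlib
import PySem

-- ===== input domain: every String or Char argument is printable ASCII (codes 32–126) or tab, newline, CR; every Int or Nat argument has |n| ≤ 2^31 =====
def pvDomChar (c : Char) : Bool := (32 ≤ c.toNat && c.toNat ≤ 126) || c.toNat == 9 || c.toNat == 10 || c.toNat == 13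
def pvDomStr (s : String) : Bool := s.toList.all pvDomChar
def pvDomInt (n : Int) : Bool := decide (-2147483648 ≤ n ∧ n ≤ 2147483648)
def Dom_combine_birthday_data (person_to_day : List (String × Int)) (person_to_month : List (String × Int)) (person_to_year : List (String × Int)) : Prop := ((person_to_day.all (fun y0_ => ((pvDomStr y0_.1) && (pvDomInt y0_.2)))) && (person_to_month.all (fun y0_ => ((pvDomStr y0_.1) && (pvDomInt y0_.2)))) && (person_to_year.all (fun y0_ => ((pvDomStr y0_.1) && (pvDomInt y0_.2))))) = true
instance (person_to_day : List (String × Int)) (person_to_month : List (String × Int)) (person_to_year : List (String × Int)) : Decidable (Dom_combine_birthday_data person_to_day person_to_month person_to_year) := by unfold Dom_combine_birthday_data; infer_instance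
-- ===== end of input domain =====

-- B replaces A's fused group-and-select dict loop by a grouping pass plus a per-month first-max selection; same result (alternative decomposition, no speed claim).


-- ===== PORT A =====
def combine_birthday_data (person_to_day : List (String × Int)) (person_to_month : List (String × Int)) (person_to_year : List (String × Int)) : List (Int × String × (Int × Int × Int)) :=
  let dayD := PySem.Dict.ofList person_to_day
  let monthD := PySem.Dict.ofList person_to_month
  let yearD := PySem.Dict.ofList person_to_year
  -- for name in person_to_month: … (lookups are getD with a dummy default; Pre_ guarantees the keys exist, where Python would raise KeyError)
  (monthD.keys.foldl (fun month_to_person_data name =>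
      let month := monthD.getD name 0
      let day := dayD.getD name 0
      let year := yearD.getD name 0
      let age := 2022 - year
      if month_to_person_data.contains month then
        if age > (month_to_person_data.getD month ("", (0, 0, 0))).2.2.2 then
          month_to_person_data.insert month (name, (day, year, age))
        else month_to_person_data
      else month_to_person_data.insert month (name, (day, year, age)))
    PySem.Dict.empty).items

-- ===== PORT B =====
def combine_birthday_data_alt (person_to_day : List (String × Int)) (person_to_month : List (String × Int)) (person_to_year : List (String × Int)) : List (Int × String × (Int × Int × Int)) :=
  let dayD := PySem.Dict.ofList person_to_day
  let monthD := PySem.Dict.ofList person_to_month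
  let yearD := PySem.Dict.ofList person_to_year
  let pairs := monthD.keys.map (fun name => (monthD.getD name 0, name))
  let month_to_names := pairs.foldl (fun d p => d.modify p.1 [] (fun v => v ++ [p.2])) PySem.Dict.empty
  (month_to_names.items.foldl (fun result q =>
      let oldest := PySem.List.maxD q.2 (fun n => 2022 - yearD.getD n 0) ""
      let year := yearD.getD oldest 0
      result.insert q.1 (oldest, (dayD.getD oldest 0, year, 2022 - year)))
    PySem.Dict.empty).items

-- ===== PRECONDITION & SPEC =====
-- Pre_ excludes exactly the inputs where Python A raises KeyError: a person listed in person_to_month but missing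
-- from person_to_day or person_to_year. (The duplicate-free key lists of a Python dict are any assoc list here:
-- PySem.Dict.ofList applies Python's last-value-wins rule, so no nodup condition is needed.)
def Pre_combine_birthday_data (person_to_day : List (String × Int)) (person_to_month : List (String × Int)) (person_to_year : List (String × Int)) : Prop :=
  ∀ p ∈ person_to_month, (∃ q ∈ person_to_day, q.1 = p.1) ∧ (∃ q ∈ person_to_year, q.1 = p.1)
instance (person_to_day : List (String × Int)) (person_to_month : List (String × Int)) (person_to_year : List (String × Int)) : Decidable (Pre_combine_birthday_data person_to_day person_to_month person_to_year) := by unfold Pre_combine_birthday_data; infer_instance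
def pvWitness_combine_birthday_data : (List (String × Int)) × (List (String × Int)) × (List (String × Int)) :=
  ([("ann", 3), ("bob", 14)], [("ann", 7), ("bob", 7)], [("ann", 1990), ("bob", 1985)])
def Spec_combine_birthday_data (person_to_day : List (String × Int)) (person_to_month : List (String × Int)) (person_to_year : List (String × Int)) (out : List (Int × String × (Int × Int × Int))) : Prop := out = combine_birthday_data_alt person_to_day person_to_month person_to_year
instance (person_to_day : List (String × Int)) (person_to_month : List (String × Int)) (person_to_year : List (String × Int)) (out : List (Int × String × (Int × Int × Int))) : Decidable (Spec_combine_birthday_data person_to_day person_to_month person_to_year out) := by unfold Spec_combine_birthday_data; infer_instance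

-- ===== CLAIM (what is proved, stated in full; the proofs are below) =====
def Claim_equal_combine_birthday_data : Prop := ∀ (person_to_day : List (String × Int)) (person_to_month : List (String × Int)) (person_to_year : List (String × Int)), Dom_combine_birthday_data person_to_day person_to_month person_to_year → Pre_combine_birthday_data person_to_day person_to_month person_to_year → Spec_combine_birthday_data person_to_day person_to_month person_to_year (combine_birthday_data person_to_day person_to_month person_to_year)

-- ===== LEMMAS AND PROOFS =====

-- the tuple A and B store for a person
def pvEntry (dd y : String → Int) (n : String) : String × (Int × Int × Int) := (n, (dd n, y n, 2022 - y n))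
-- the per-month selection: first person of maximal age in the group
def pvPick (dd y : String → Int) (g : List String) : String × (Int × Int × Int) :=
  pvEntry dd y (PySem.List.maxD g (fun n => 2022 - y n) "")
-- A's loop body, named for the induction
def pvStepA (m dd y : String → Int) (d : PySem.Dict Int (String × (Int × Int × Int))) (name : String) : PySem.Dict Int (String × (Int × Int × Int)) :=
  if d.contains (m name) then
    if 2022 - y name > (d.getD (m name) ("", (0, 0, 0))).2.2.2 then
      d.insert (m name) (pvEntry dd y name)
    else d
  else d.insert (m name) (pvEntry dd y name)

theorem pv_max?_append_singleton {α κ : Type} [LT κ] [DecidableLT κ] (g : List α) (n : α) (key : α → κ) :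
    PySem.List.max? (g ++ [n]) key =
      match PySem.List.max? g key with
      | none => some n
      | some m => if key m < key n then some n else some m := by
  simp only [PySem.List.max?, List.foldl_append, List.foldl_cons, List.foldl_nil]
  rfl

theorem pv_pick_append (dd y : String → Int) (g : List String) (n : String) {mx : String}
    (hmx : PySem.List.max? g (fun x => 2022 - y x) = some mx) :
    pvPick dd y (g ++ [n]) =
      if 2022 - y mx < 2022 - y n then pvEntry dd y n else pvPick dd y g := by
  by_cases h : 2022 - y mx < 2022 - y n
  · rw [if_pos h]
    unfold pvPick PySem.List.maxD
    rw [pv_max?_append_singleton, hmx]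
    simp [h]
  · rw [if_neg h]
    unfold pvPick PySem.List.maxD
    rw [pv_max?_append_singleton, hmx]
    simp [h]

theorem pv_filter_nil_of_not_mem (m : String → Int) (l : List String) (mo : Int)
    (h : mo ∉ l.map m) : l.filter (fun n => m n == mo) = [] := by
  rw [List.filter_eq_nil_iff]
  intro x hx hbx
  exact h (List.mem_map.mpr ⟨x, hx, (beq_iff_eq.mp hbx)⟩)

-- A's fold over any name list l computes, per month, the first-max-by-age entry of the group.
theorem pv_afold_items (m dd y : String → Int) (l : List String) :
    (l.foldl (fun month_to_person_data name =>
        if month_to_person_data.contains (m name) then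
          if 2022 - y name > (month_to_person_data.getD (m name) ("", (0, 0, 0))).2.2.2 then
            month_to_person_data.insert (m name) (name, (dd name, y name, 2022 - y name))
          else month_to_person_data
        else month_to_person_data.insert (m name) (name, (dd name, y name, 2022 - y name)))
      PySem.Dict.empty).items
    = (PySem.Set.ofList (l.map m)).map
        (fun mo => (mo, pvPick dd y (l.filter (fun n => m n == mo)))) := by
  have hstep : (fun (month_to_person_data : PySem.Dict Int (String × (Int × Int × Int))) name =>
        if month_to_person_data.contains (m name) then
          if 2022 - y name > (month_to_person_data.getD (m name) ("", (0, 0, 0))).2.2.2 then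
            month_to_person_data.insert (m name) (name, (dd name, y name, 2022 - y name))
          else month_to_person_data
        else month_to_person_data.insert (m name) (name, (dd name, y name, 2022 - y name)))
      = pvStepA m dd y := rfl
  rw [hstep]
  induction l using List.reverseRecOn with
  | nil => rfl
  | append_singleton l n ih =>
    rw [List.foldl_append, List.foldl_cons, List.foldl_nil]
    set d := l.foldl (pvStepA m dd y) PySem.Dict.empty with hd
    set S := PySem.Set.ofList (l.map m) with hS
    have hnd : S.Nodup := PySem.Set.nodup_ofList _
    have hkeys : d.keys = S := by
      simp [PySem.Dict.keys, ih, List.map_map, Function.comp_def]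
    have hRHSset : PySem.Set.ofList ((l ++ [n]).map m) = PySem.Set.add S (m n) := by
      rw [List.map_append]
      simp [PySem.Set.ofList_append_singleton, hS]
    have hfilter : ∀ mo : Int, (l ++ [n]).filter (fun x => m x == mo)
        = l.filter (fun x => m x == mo) ++ (if m n = mo then [n] else []) := by
      intro mo
      rw [List.filter_append]
      congr 1
      split_ifs with h <;> simp [h]
    by_cases hm : m n ∈ S
    · -- the month is already a key
      have hcont : d.contains (m n) = true := by
        rw [PySem.Dict.contains_eq_decide_mem_keys, hkeys]; simp [hm]
      have hmem_l : m n ∈ l.map m := (PySem.Set.mem_ofList _ _).mp (hS ▸ hm)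
      obtain ⟨x, hxl, hxm⟩ := List.mem_map.mp hmem_l
      have hxg : x ∈ l.filter (fun t => m t == m n) := by
        simp [List.mem_filter, hxl, hxm]
      obtain ⟨mx, hmx⟩ : ∃ mx, PySem.List.max? (l.filter (fun t => m t == m n)) (fun t => 2022 - y t) = some mx := by
        cases h : PySem.List.max? (l.filter (fun t => m t == m n)) (fun t => 2022 - y t) with
        | none =>
          have := (PySem.List.max?_eq_none_iff _ _).mp h
          rw [this] at hxg; cases hxg
        | some mx => exact ⟨mx, rfl⟩
      have hget : d.getD (m n) ("", (0, 0, 0)) = pvPick dd y (l.filter (fun t => m t == m n)) := by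
        apply PySem.Dict.getD_of_mem_items
        · rw [ih]; exact List.mem_map.mpr ⟨m n, hm, rfl⟩
        · rw [hkeys]; exact hnd
      have hpick : pvPick dd y (l.filter (fun t => m t == m n)) = pvEntry dd y mx := by
        unfold pvPick PySem.List.maxD
        rw [hmx]; rfl
      rw [hRHSset, PySem.Set.add_of_mem hm]
      unfold pvStepA
      rw [hcont, hget, hpick]
      rw [if_pos rfl]
      have hproj : (pvEntry dd y mx).2.2.2 = 2022 - y mx := rfl
      rw [hproj]
      by_cases hage : 2022 - y n > 2022 - y mx
      · rw [if_pos hage, PySem.Dict.items_insert_of_contains d _ hcont, ih, List.map_map]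
        apply List.map_congr_left
        intro mo hmo
        by_cases hmoeq : mo = m n
        · subst hmoeq
          simp only [Function.comp_def]
          rw [hfilter, if_pos rfl, pv_pick_append dd y _ n hmx, if_pos hage]
          simp [pvEntry]
        · simp only [Function.comp_def]
          rw [hfilter mo, if_neg (show ¬ (m n = mo) from fun h => hmoeq h.symm)]
          simp [hmoeq]
      · rw [if_neg hage, ih]
        apply List.map_congr_left
        intro mo hmo
        by_cases hmoeq : mo = m n
        · subst hmoeq
          rw [hfilter, if_pos rfl, pv_pick_append dd y _ n hmx, if_neg hage]
        · rw [hfilter mo, if_neg (show ¬ (m n = mo) from fun h => hmoeq h.symm)]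
          simp
    · -- new month key
      have hcont : d.contains (m n) = false := by
        rw [PySem.Dict.contains_eq_decide_mem_keys, hkeys]; simp [hm]
      have hmem_l : m n ∉ l.map m := fun h => hm ((PySem.Set.mem_ofList _ _).mpr h)
      rw [hRHSset, PySem.Set.add_of_not_mem hm]
      unfold pvStepA
      rw [hcont]
      simp only [Bool.false_eq_true, if_false, List.map_append]
      rw [PySem.Dict.items_insert_of_not_contains d _ hcont, ih]
      congr 1
      · apply List.map_congr_left
        intro mo hmo
        have hmoeq : mo ≠ m n := fun h => hm (h ▸ hmo)
        rw [hfilter mo, if_neg (show ¬ (m n = mo) from fun h => hmoeq h.symm)]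
        simp
      · simp only [List.map_cons, List.map_nil]
        rw [hfilter (m n), if_pos rfl, pv_filter_nil_of_not_mem m l (m n) hmem_l]
        simp [pvPick, pvEntry, PySem.List.maxD, PySem.List.max?]

-- B's two passes compute the same per-month selection.
theorem pv_bfold_items (m dd y : String → Int) (l : List String) :
    (((l.map (fun name => (m name, name))).foldl
        (fun d p => d.modify p.1 [] (fun v => v ++ [p.2])) PySem.Dict.empty).items.foldl
      (fun result q =>
        result.insert q.1
          (PySem.List.maxD q.2 (fun n => 2022 - y n) "",
            (dd (PySem.List.maxD q.2 (fun n => 2022 - y n) ""),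
              y (PySem.List.maxD q.2 (fun n => 2022 - y n) ""),
              2022 - y (PySem.List.maxD q.2 (fun n => 2022 - y n) ""))))
      PySem.Dict.empty).items
    = (PySem.Set.ofList (l.map m)).map
        (fun mo => (mo, pvPick dd y (l.filter (fun n => m n == mo)))) := by
  set pairs := l.map (fun name => (m name, name)) with hpairs
  set grouped := pairs.foldl (fun d p => d.modify p.1 [] (fun v => v ++ [p.2])) PySem.Dict.empty with hgrouped
  have hkeysg : grouped.keys = PySem.Set.ofList (l.map m) := by
    rw [hgrouped, PySem.Dict.keys_foldl_modify_key pairs (fun p => p.1) [] (fun _ p v => v ++ [p.2]) PySem.Dict.empty]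
    rw [PySem.Dict.keys_empty, PySem.Set.update_nil_left, hpairs, List.map_map]
    rfl
  have hndg : grouped.keys.Nodup := by rw [hkeysg]; exact PySem.Set.nodup_ofList _
  have hitemsg : grouped.items = (PySem.Set.ofList (l.map m)).map
      (fun mo => (mo, l.filter (fun n => m n == mo))) := by
    rw [PySem.Dict.items_eq_map_keys grouped hndg [], hkeysg]
    apply List.map_congr_left
    intro mo hmo
    rw [hgrouped, PySem.Dict.getD_foldl_modify_append pairs PySem.Dict.empty mo]
    rw [PySem.Dict.getD_empty, hpairs, List.filter_map, List.map_map]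
    simp [Function.comp_def]
  have h2 : ((grouped.items).foldl
      (fun result q =>
        result.insert q.1
          (PySem.List.maxD q.2 (fun n => 2022 - y n) "",
            (dd (PySem.List.maxD q.2 (fun n => 2022 - y n) ""),
              y (PySem.List.maxD q.2 (fun n => 2022 - y n) ""),
              2022 - y (PySem.List.maxD q.2 (fun n => 2022 - y n) ""))))
      PySem.Dict.empty).items
      = PySem.Dict.empty.items ++ grouped.items.map (fun q =>
          (q.1, (PySem.List.maxD q.2 (fun n => 2022 - y n) "",
            (dd (PySem.List.maxD q.2 (fun n => 2022 - y n) ""),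
              y (PySem.List.maxD q.2 (fun n => 2022 - y n) ""),
              2022 - y (PySem.List.maxD q.2 (fun n => 2022 - y n) ""))))) :=
    PySem.Dict.items_foldl_insert_fresh _ _ _ _ (fun a _ => PySem.Dict.contains_empty _) hndg
  rw [h2, hitemsg, List.map_map]
  simp [pvPick, pvEntry, Function.comp_def, PySem.Dict.empty]


-- ===== VERDICT (by name: the statement is the Claim_ definition above) =====
theorem combine_birthday_data_spec : Claim_equal_combine_birthday_data := by
  intro pd pm py _ _
  unfold Spec_combine_birthday_data combine_birthday_data combine_birthday_data_alt
  simp only []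
  rw [pv_afold_items (fun n => (PySem.Dict.ofList pm).getD n 0)
        (fun n => (PySem.Dict.ofList pd).getD n 0) (fun n => (PySem.Dict.ofList py).getD n 0),
      pv_bfold_items (fun n => (PySem.Dict.ofList pm).getD n 0)
        (fun n => (PySem.Dict.ofList pd).getD n 0) (fun n => (PySem.Dict.ofList py).getD n 0)]
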